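-- pv_equiv track=rewrite | github.com/blaisewang/leetcode | hard/336.回文对.py | get_palindrome_parts
-- ===== SOURCE A (Python) =====
-- from typing import List, Tuple
--
-- def get_palindrome_parts(string: str) -> Tuple[list, list]:
--     p, s = [], []
--     for i in range(0, len(string) + 1):
--         if string[:i] == string[:i][::-1]:
--             p.append(string[i:][::-1])
--         if string[i:] == string[i:][::-1]:
--             s.append(string[:i][::-1])
--
--     return p, s
-- ===== SOURCE B (Python) =====
-- def get_palindrome_parts(string):
--     # Single sweep over the characters maintaining the prefix, the suffix and their
--     # reversals incrementally as char lists; no slicing or re-reversing per index.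
--     p, s = [], []
--     left, rev_left = [], []
--     right, rev_right = list(string), list(reversed(string))
--     while True:
--         if left == rev_left:
--             p.append(''.join(rev_right))
--         if right == rev_right:
--             s.append(''.join(rev_left))
--         if not right:
--             return p, s
--         c = right.pop(0)
--         left.append(c)
--         rev_left.insert(0, c)
--         rev_right.pop()
-- ===== Notes on version B (the rewrite author's own statement) =====
-- stated objective: alternative
-- what changed: B replaces A's per-index slicing and reversing (string[:i], string[i:], [::-1] built fresh at every i) with a single sweep over the characters that maintains four incremental accumulators - the prefix, its reversal, the suffix and its reversal - updated in O(1) list operations per step, appending the already-materialised reversed complement when an accumulator equals its reversal.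
import Mathlib
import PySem

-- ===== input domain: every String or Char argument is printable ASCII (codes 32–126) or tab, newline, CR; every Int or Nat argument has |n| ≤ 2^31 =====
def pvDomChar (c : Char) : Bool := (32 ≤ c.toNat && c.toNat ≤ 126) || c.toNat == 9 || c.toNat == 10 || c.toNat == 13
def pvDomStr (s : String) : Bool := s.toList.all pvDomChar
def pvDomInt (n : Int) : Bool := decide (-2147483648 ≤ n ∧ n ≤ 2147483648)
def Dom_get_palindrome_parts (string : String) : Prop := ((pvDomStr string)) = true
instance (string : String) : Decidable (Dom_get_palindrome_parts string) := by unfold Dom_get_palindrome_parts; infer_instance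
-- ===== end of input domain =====

-- B replaces A's per-index slice-and-reverse tests by ONE sweep over the characters that
-- maintains the prefix, the suffix and their reversals incrementally (objective: alternative).

-- ===== PORT A =====
-- A's loop body (the two if/append statements), named for readability
def pvABody (string : String) (acc : List String × List String) (i : Int) : List String × List String :=
  (if PySem.Str.slice string none (some i) =
        (PySem.Str.slice? (PySem.Str.slice string none (some i)) none none (-1)).getD ""
    then acc.1 ++ [(PySem.Str.slice? (PySem.Str.slice string (some i) none) none none (-1)).getD ""]
    else acc.1,
   if PySem.Str.slice string (some i) none =
        (PySem.Str.slice? (PySem.Str.slice string (some i) none) none none (-1)).getD ""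
    then acc.2 ++ [(PySem.Str.slice? (PySem.Str.slice string none (some i)) none none (-1)).getD ""]
    else acc.2)

def get_palindrome_parts (string : String) : List String × List String :=
  (PySem.List.pyRange 0 (PySem.Str.len string + 1) 1).foldl (pvABody string) ([], [])

-- ===== PORT B =====
-- B's while-True loop: char-list accumulators left / rev_left / right / rev_right
def pvAltLoop (left revLeft right revRight : List Char) (p s : List String) :
    List String × List String :=
  let p' := if left = revLeft then p ++ [String.ofList revRight] else p
  let s' := if right = revRight then s ++ [String.ofList revLeft] else s
  match right with
  | [] => (p', s')
  | c :: rest => pvAltLoop (left ++ [c]) (c :: revLeft) rest revRight.dropLast p' s'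

def get_palindrome_parts_alt (string : String) : List String × List String :=
  pvAltLoop [] [] string.toList string.toList.reverse [] []

-- ===== PRECONDITION & SPEC =====
def Spec_get_palindrome_parts (string : String) (out : List String × List String) : Prop := out = get_palindrome_parts_alt string
instance (string : String) (out : List String × List String) : Decidable (Spec_get_palindrome_parts string out) := by unfold Spec_get_palindrome_parts; infer_instance

-- ===== CLAIM (what is proved, stated in full; the proofs are below) =====
def Claim_equal_get_palindrome_parts : Prop := ∀ (string : String), Dom_get_palindrome_parts string → Spec_get_palindrome_parts string (get_palindrome_parts string)

-- ===== LEMMAS AND PROOFS =====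

theorem pvABody_eq (string : String) (i : Int) (h0 : 0 ≤ i) (acc : List String × List String) :
    pvABody string acc i =
      (if string.toList.take i.toNat = (string.toList.take i.toNat).reverse
        then acc.1 ++ [String.ofList (string.toList.drop i.toNat).reverse] else acc.1,
       if string.toList.drop i.toNat = (string.toList.drop i.toNat).reverse
        then acc.2 ++ [String.ofList (string.toList.take i.toNat).reverse] else acc.2) := by
  unfold pvABody
  simp only [PySem.Str.slice?_none_none_neg_one, Option.getD_some, PySem.Str.slice,
    PySem.Chars.slice, PySem.List.slice_to string.toList h0,
    PySem.List.slice_from string.toList h0, String.toList_ofList, String.ofList_inj]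

theorem pvAltLoop_nil (left revLeft revRight : List Char) (p s : List String) :
    pvAltLoop left revLeft [] revRight p s =
      (if left = revLeft then p ++ [String.ofList revRight] else p,
       if ([] : List Char) = revRight then s ++ [String.ofList revLeft] else s) := rfl

theorem pvAltLoop_cons (left revLeft : List Char) (c : Char) (rest revRight : List Char)
    (p s : List String) :
    pvAltLoop left revLeft (c :: rest) revRight p s =
      pvAltLoop (left ++ [c]) (c :: revLeft) rest revRight.dropLast
        (if left = revLeft then p ++ [String.ofList revRight] else p)
        (if (c :: rest) = revRight then s ++ [String.ofList revLeft] else s) := rfl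

theorem pvLoop_eq (string : String) : ∀ (right left : List Char) (p s : List String),
    string.toList = left ++ right →
    pvAltLoop left left.reverse right right.reverse p s =
      (PySem.List.pyRange (left.length : Int) ((string.toList.length : Int) + 1) 1).foldl
        (pvABody string) (p, s) := by
  intro right
  induction right with
  | nil =>
    intro left p s h
    have hlen : left.length = string.toList.length := by rw [h]; simp
    rw [PySem.List.pyRange_one_cons (by omega), PySem.List.pyRange_one_eq_nil (by omega)]
    simp only [List.foldl_cons, List.foldl_nil]
    rw [pvABody_eq string _ (by positivity)]
    have ht : string.toList.take (Int.toNat (left.length : Int)) = left := by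
      simp [h]
    have hd : string.toList.drop (Int.toNat (left.length : Int)) = [] := by
      simp [h]
    rw [ht, hd, pvAltLoop_nil]
  | cons c rest ih =>
    intro left p s h
    have hlen : left.length + (rest.length + 1) = string.toList.length := by
      rw [h]; simp
    rw [PySem.List.pyRange_one_cons (by omega)]
    simp only [List.foldl_cons]
    rw [pvABody_eq string _ (by positivity)]
    have ht : string.toList.take (Int.toNat (left.length : Int)) = left := by
      simp [h]
    have hd : string.toList.drop (Int.toNat (left.length : Int)) = c :: rest := by
      simp [h]
    rw [ht, hd, pvAltLoop_cons]
    have h1 : (c :: left.reverse) = (left ++ [c]).reverse := by simp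
    have h2 : ((c :: rest).reverse).dropLast = rest.reverse := by simp
    rw [h1, h2, ih (left ++ [c]) _ _ (by simp [h])]
    have h3 : ((left ++ [c]).length : Int) = (left.length : Int) + 1 := by simp
    rw [h3]

theorem pv_main (string : String) :
    get_palindrome_parts string = get_palindrome_parts_alt string := by
  have h := pvLoop_eq string string.toList [] [] [] (by simp)
  simp only [List.reverse_nil, List.length_nil, Nat.cast_zero] at h
  unfold get_palindrome_parts get_palindrome_parts_alt
  rw [h, PySem.Str.len_eq]

-- ===== VERDICT (by name: the statement is the Claim_ definition above) =====
theorem get_palindrome_parts_spec : Claim_equal_get_palindrome_parts := by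
  intro string _
  unfold Spec_get_palindrome_parts
  exact (pv_main string)
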